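-- pv_equiv track=rewrite | github.com/peternehl/quarex-website | libraries/_utils/auto-tagger.py | find_multiple_tags
-- ===== SOURCE A (Python) =====
-- from typing import Dict, List, Optional, Tuple, Set
--
-- def normalize_text(text: str) -> str:
--     """Normalize text for matching - lowercase and clean."""
--     return text.lower().strip()
--
-- def find_multiple_tags(text: str, keyword_map: Dict[str, List[str]], valid_tags: Set[str],
--                        exclude: Set[str] = None, limit: int = 3) -> List[str]:
--     """Find multiple matching tags, excluding already-used ones."""
--     if exclude is None:
--         exclude = set()
--
--     text_lower = normalize_text(text)
--
--     scores = {}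
--     for tag, keywords in keyword_map.items():
--         if tag not in valid_tags or tag in exclude:
--             continue
--         score = 0
--         for keyword in keywords:
--             if keyword.lower() in text_lower:
--                 score += len(keyword.split())
--         if score > 0:
--             scores[tag] = score
--
--     # Sort by score descending and return top matches
--     sorted_tags = sorted(scores.keys(), key=lambda t: scores[t], reverse=True)
--     return sorted_tags[:limit]
-- ===== SOURCE B (Python) =====
-- def find_multiple_tags(text, keyword_map, valid_tags, exclude=None, limit=3):
--     """Find multiple matching tags, excluding already-used ones."""
--     excluded = exclude if exclude is not None else set()
--     text_lower = text.lower().strip()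
--
--     # Memoise the substring test: one search per distinct keyword string of the kept tags,
--     # keyword -> its score contribution (word count if present in text, else 0).
--     weight = {}
--     for tag, kws in keyword_map.items():
--         if tag in valid_tags and tag not in excluded:
--             for kw in kws:
--                 if kw not in weight:
--                     weight[kw] = len(kw.split()) if kw.lower() in text_lower else 0
--
--     ranked = []
--     for tag, kws in keyword_map.items():
--         if tag in valid_tags and tag not in excluded:
--             s = 0
--             for kw in kws:
--                 s += weight[kw]
--             if s > 0:
--                 ranked.append((tag, s))
--
--     ranked = sorted(ranked, key=lambda p: p[1], reverse=True)
--     return [tag for tag, _ in ranked][:limit]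
-- ===== Notes on version B (the rewrite author's own statement) =====
-- stated objective: alternative
-- what changed: B memoises the substring test in a dict built in a first pass over the kept tags (one 'kw.lower() in text' search per distinct keyword string instead of one per occurrence) and ranks (tag, score) pairs directly, sorting them by their stored score component instead of building a score dict and re-looking each score up in the sort key.
import Mathlib
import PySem

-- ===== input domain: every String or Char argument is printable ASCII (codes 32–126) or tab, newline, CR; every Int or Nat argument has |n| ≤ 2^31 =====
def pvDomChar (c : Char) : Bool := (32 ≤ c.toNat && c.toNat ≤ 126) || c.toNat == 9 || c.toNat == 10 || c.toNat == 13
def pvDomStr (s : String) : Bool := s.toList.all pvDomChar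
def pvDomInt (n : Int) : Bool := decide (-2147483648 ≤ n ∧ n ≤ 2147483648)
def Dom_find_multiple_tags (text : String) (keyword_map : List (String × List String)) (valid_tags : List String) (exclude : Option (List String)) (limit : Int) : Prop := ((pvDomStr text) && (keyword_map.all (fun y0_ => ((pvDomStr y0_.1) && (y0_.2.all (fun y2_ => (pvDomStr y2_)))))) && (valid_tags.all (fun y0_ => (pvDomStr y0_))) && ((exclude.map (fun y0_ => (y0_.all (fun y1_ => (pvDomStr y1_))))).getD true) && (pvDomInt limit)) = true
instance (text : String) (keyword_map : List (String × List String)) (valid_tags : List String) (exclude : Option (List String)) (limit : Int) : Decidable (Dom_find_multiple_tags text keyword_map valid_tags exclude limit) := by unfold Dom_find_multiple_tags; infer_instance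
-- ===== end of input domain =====

-- B memoises the substring test in a dict built once (one search per distinct keyword) and
-- ranks (tag, score) pairs directly instead of building a score dict and re-looking scores up
-- as the sort key; objective: alternative (removes repeated substring searches for duplicate keywords).

-- ===== PORT A =====
-- helper normalize_text: text.lower().strip()
def normalize_text (text : String) : String := PySem.Str.strip (PySem.Str.lower text)

-- inner loop of A: score = sum of len(keyword.split()) over keywords found in text_lower
def pvTagScore (text_lower : String) (keywords : List String) : Int :=
  keywords.foldl (fun score keyword =>
    if PySem.Str.isIn (PySem.Str.lower keyword) text_lower
    then score + PySem.List.len (PySem.Str.split₀ keyword) else score) 0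

-- A's main loop over keyword_map.items() building the scores dict
def pvScoresLoop (valid_tags excl : List String) (text_lower : String)
    (items : List (String × List String)) (scores : PySem.Dict String Int) : PySem.Dict String Int :=
  items.foldl (fun scores p =>
    if !(valid_tags.contains p.1) || excl.contains p.1 then scores
    else
      let score := pvTagScore text_lower p.2
      if 0 < score then scores.insert p.1 score else scores) scores

def find_multiple_tags (text : String) (keyword_map : List (String × List String)) (valid_tags : List String) (exclude : Option (List String)) (limit : Int) : List String :=
  let excl : List String := exclude.getD []
  let text_lower := normalize_text text
  let scores := pvScoresLoop valid_tags excl text_lower (PySem.Dict.ofList keyword_map).items PySem.Dict.empty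
  -- sorted(scores.keys(), key=lambda t: scores[t], reverse=True); t is always a key, so scores[t] = getD t 0
  let sorted_tags := PySem.List.sorted scores.keys (fun t => scores.getD t 0) true
  PySem.List.slice sorted_tags none (some limit)

-- ===== PORT B =====
-- weight of one keyword: len(kw.split()) if kw.lower() in text_lower else 0
def pvKwWeight (text_lower kw : String) : Int :=
  if PySem.Str.isIn (PySem.Str.lower kw) text_lower then PySem.List.len (PySem.Str.split₀ kw) else 0

-- B's memo loop: weight[kw] set once per distinct keyword
def pvMemoAdd (text_lower : String) (w : PySem.Dict String Int) (kw : String) : PySem.Dict String Int :=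
  if w.contains kw then w else w.insert kw (pvKwWeight text_lower kw)

def pvWeightLoop (valid_tags excl : List String) (text_lower : String)
    (items : List (String × List String)) : PySem.Dict String Int :=
  items.foldl (fun w p =>
    if valid_tags.contains p.1 && !(excl.contains p.1)
    then p.2.foldl (pvMemoAdd text_lower) w else w) PySem.Dict.empty

-- B's inner sum: s += weight[kw]; kw is always a key, so weight[kw] = getD kw 0
def pvSumWeight (w : PySem.Dict String Int) (kws : List String) : Int :=
  kws.foldl (fun s kw => s + w.getD kw 0) 0

-- B's ranking loop: append (tag, s) for kept tags with positive score
def pvRankedLoop (valid_tags excl : List String) (w : PySem.Dict String Int)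
    (items : List (String × List String)) (ranked : List (String × Int)) : List (String × Int) :=
  items.foldl (fun ranked p =>
    if valid_tags.contains p.1 && !(excl.contains p.1) then
      let s := pvSumWeight w p.2
      if 0 < s then ranked ++ [(p.1, s)] else ranked
    else ranked) ranked

def find_multiple_tags_alt (text : String) (keyword_map : List (String × List String)) (valid_tags : List String) (exclude : Option (List String)) (limit : Int) : List String :=
  let excl : List String := exclude.getD []
  let text_lower := PySem.Str.strip (PySem.Str.lower text)
  let d := PySem.Dict.ofList keyword_map
  let weight := pvWeightLoop valid_tags excl text_lower d.items
  let ranked := pvRankedLoop valid_tags excl weight d.items []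
  let ranked2 := PySem.List.sorted ranked (fun p => p.2) true
  PySem.List.slice (ranked2.map (fun p => p.1)) none (some limit)

-- ===== PRECONDITION & SPEC =====
def Spec_find_multiple_tags (text : String) (keyword_map : List (String × List String)) (valid_tags : List String) (exclude : Option (List String)) (limit : Int) (out : List String) : Prop := out = find_multiple_tags_alt text keyword_map valid_tags exclude limit
instance (text : String) (keyword_map : List (String × List String)) (valid_tags : List String) (exclude : Option (List String)) (limit : Int) (out : List String) : Decidable (Spec_find_multiple_tags text keyword_map valid_tags exclude limit out) := by unfold Spec_find_multiple_tags; infer_instance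

-- ===== CLAIM (what is proved, stated in full; the proofs are below) =====
def Claim_equal_find_multiple_tags : Prop := ∀ (text : String) (keyword_map : List (String × List String)) (valid_tags : List String) (exclude : Option (List String)) (limit : Int), Dom_find_multiple_tags text keyword_map valid_tags exclude limit → Spec_find_multiple_tags text keyword_map valid_tags exclude limit (find_multiple_tags text keyword_map valid_tags exclude limit)

-- ===== LEMMAS AND PROOFS =====

theorem pvMemo_inv (tl : String) (kws : List String) (w : PySem.Dict String Int)
    (h : ∀ k, w.contains k = true → w.getD k 0 = pvKwWeight tl k) :
    ∀ k, (kws.foldl (pvMemoAdd tl) w).contains k = true →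
      (kws.foldl (pvMemoAdd tl) w).getD k 0 = pvKwWeight tl k := by
  induction kws generalizing w with
  | nil => exact h
  | cons kw kws ih =>
    intro k hk
    refine ih (pvMemoAdd tl w kw) ?_ k hk
    intro k' hk'
    unfold pvMemoAdd at *
    by_cases hc : w.contains kw = true
    · simp [hc] at hk' ⊢; exact h k' hk'
    · simp [hc] at hk' ⊢
      rw [PySem.Dict.getD_insert]
      by_cases he : k' = kw
      · simp [he]
      · simp [he]
        rw [PySem.Dict.contains_insert] at hk'
        simp [he] at hk'
        exact h k' hk'

theorem pvMemo_mono (tl : String) (kws : List String) (w : PySem.Dict String Int) (k : String)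
    (h : w.contains k = true) : (kws.foldl (pvMemoAdd tl) w).contains k = true := by
  induction kws generalizing w with
  | nil => exact h
  | cons kw kws ih =>
    refine ih _ ?_
    unfold pvMemoAdd
    split
    · exact h
    · rw [PySem.Dict.contains_insert]; simp [h]

theorem pvMemo_attain (tl : String) (kws : List String) (w : PySem.Dict String Int) (k : String)
    (h : k ∈ kws) : (kws.foldl (pvMemoAdd tl) w).contains k = true := by
  induction kws generalizing w with
  | nil => cases h
  | cons kw kws ih =>
    rcases List.mem_cons.1 h with rfl | hm
    · refine pvMemo_mono tl kws (pvMemoAdd tl w k) k ?_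
      unfold pvMemoAdd
      split
      · assumption
      · exact PySem.Dict.contains_insert_self _ _ _
    · exact ih _ hm

theorem pvMemo_mono2 (vt excl : List String) (tl : String)
    (l : List (String × List String)) (w : PySem.Dict String Int) (k : String)
    (h : w.contains k = true) :
    (l.foldl (fun w p => if vt.contains p.1 && !(excl.contains p.1)
        then p.2.foldl (pvMemoAdd tl) w else w) w).contains k = true := by
  induction l generalizing w with
  | nil => exact h
  | cons p l ih =>
    simp only [List.foldl_cons]
    split
    · exact ih _ (pvMemo_mono tl p.2 w k h)
    · exact ih _ h

theorem pvWeightLoop_getD (vt excl : List String) (tl : String)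
    (items : List (String × List String)) (p : String × List String)
    (hp : p ∈ items) (hv : vt.contains p.1 = true) (he : excl.contains p.1 = false)
    (k : String) (hk : k ∈ p.2) :
    (pvWeightLoop vt excl tl items).getD k 0 = pvKwWeight tl k := by
  have inv : ∀ (l : List (String × List String)) (w : PySem.Dict String Int),
      (∀ k', w.contains k' = true → w.getD k' 0 = pvKwWeight tl k') →
      ∀ k', (l.foldl (fun w p => if vt.contains p.1 && !(excl.contains p.1)
            then p.2.foldl (pvMemoAdd tl) w else w) w).contains k' = true →
        (l.foldl (fun w p => if vt.contains p.1 && !(excl.contains p.1)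
            then p.2.foldl (pvMemoAdd tl) w else w) w).getD k' 0 = pvKwWeight tl k' := by
    intro l
    induction l with
    | nil => intro w h; exact h
    | cons q l ih =>
      intro w h
      simp only [List.foldl_cons]
      split
      · exact ih _ (pvMemo_inv tl q.2 w h)
      · exact ih _ h
  have att : ∀ (l : List (String × List String)) (w : PySem.Dict String Int), p ∈ l →
      (l.foldl (fun w p => if vt.contains p.1 && !(excl.contains p.1)
          then p.2.foldl (pvMemoAdd tl) w else w) w).contains k = true := by
    intro l
    induction l with
    | nil => intro w h; cases h
    | cons q l ih =>
      intro w h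
      simp only [List.foldl_cons]
      rcases List.mem_cons.1 h with rfl | hm
      · rw [if_pos (by rw [hv, he]; rfl)]
        exact pvMemo_mono2 vt excl tl l _ k (pvMemo_attain tl p.2 w k hk)
      · exact ih _ hm
  exact inv items PySem.Dict.empty
    (by intro k' h; rw [PySem.Dict.contains_empty] at h; cases h) k (att items _ hp)

theorem pvSumWeight_eq (tl : String) (w : PySem.Dict String Int) (kws : List String)
    (h : ∀ kw ∈ kws, w.getD kw 0 = pvKwWeight tl kw) :
    pvSumWeight w kws = pvTagScore tl kws := by
  unfold pvSumWeight pvTagScore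
  have : ∀ (s : Int), kws.foldl (fun s kw => s + w.getD kw 0) s
      = kws.foldl (fun score keyword =>
          if PySem.Str.isIn (PySem.Str.lower keyword) tl
          then score + PySem.List.len (PySem.Str.split₀ keyword) else score) s := by
    induction kws with
    | nil => intro s; rfl
    | cons kw kws ih =>
      intro s
      have hkw := h kw (List.mem_cons_self)
      simp only [List.foldl_cons]
      rw [hkw]
      rw [ih (fun kw' h' => h kw' (List.mem_cons_of_mem _ h'))]
      unfold pvKwWeight
      split <;> simp
  exact this 0

theorem pvRankedLoop_sublist (vt excl : List String) (w : PySem.Dict String Int)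
    (l : List (String × List String)) (r : List (String × Int)) :
    List.Sublist ((pvRankedLoop vt excl w l r).map Prod.fst) (r.map Prod.fst ++ l.map Prod.fst) := by
  induction l generalizing r with
  | nil => simp [pvRankedLoop]
  | cons p l ih =>
    unfold pvRankedLoop at *
    simp only [List.foldl_cons]
    by_cases hc : (vt.contains p.1 && !(excl.contains p.1)) = true
    · simp only [hc, if_true]
      by_cases hs : 0 < pvSumWeight w p.2
      · simp only [hs, if_true]
        have := ih (r ++ [(p.1, pvSumWeight w p.2)])
        simpa using this
      · simp only [hs, if_false]
        refine (ih r).trans ?_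
        simp only [List.map_cons]
        exact List.append_sublist_append_left _ |>.2 (List.sublist_cons_self _ _)
    · simp only [hc]
      refine (ih r).trans ?_
      simp only [List.map_cons]
      exact List.append_sublist_append_left _ |>.2 (List.sublist_cons_self _ _)

theorem pvLoop_items (vt excl : List String) (tl : String) (w : PySem.Dict String Int)
    (l : List (String × List String)) (sc : PySem.Dict String Int) (r : List (String × Int))
    (hitems : sc.items = r)
    (hnd : (l.map Prod.fst).Nodup)
    (hdisj : ∀ p ∈ l, sc.contains p.1 = false)
    (hscore : ∀ p ∈ l, vt.contains p.1 = true → excl.contains p.1 = false →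
      pvSumWeight w p.2 = pvTagScore tl p.2) :
    (pvScoresLoop vt excl tl l sc).items = pvRankedLoop vt excl w l r := by
  induction l generalizing sc r with
  | nil => simpa [pvScoresLoop, pvRankedLoop] using hitems
  | cons p l ih =>
    unfold pvScoresLoop pvRankedLoop at *
    simp only [List.foldl_cons]
    have hnd' : (l.map Prod.fst).Nodup := (List.nodup_cons.1 (by simpa using hnd)).2
    have hp1 : p.1 ∉ l.map Prod.fst := (List.nodup_cons.1 (by simpa using hnd)).1
    have ihskip := ih sc r hitems hnd' (fun q hq => hdisj q (List.mem_cons_of_mem _ hq))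
      (fun q hq => hscore q (List.mem_cons_of_mem _ hq))
    cases hv : vt.contains p.1 <;> cases he : excl.contains p.1 <;>
      simp only [Bool.not_true, Bool.not_false, Bool.or_false, Bool.or_true,
        Bool.and_true, Bool.and_false, Bool.false_eq_true, if_true, if_false] <;>
      try exact ihskip
    -- kept case: hv = true, he = false
    rw [hscore p List.mem_cons_self hv he]
    by_cases hs : 0 < pvTagScore tl p.2
    · simp only [hs, if_true]
      refine ih _ _ ?_ hnd' ?_
        (fun q hq => hscore q (List.mem_cons_of_mem _ hq))
      · rw [PySem.Dict.items_insert_of_not_contains _ _ (hdisj p List.mem_cons_self), hitems]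
      · intro q hq
        rw [PySem.Dict.contains_insert]
        have h1 : sc.contains q.1 = false := hdisj q (List.mem_cons_of_mem _ hq)
        have h2 : q.1 ≠ p.1 := by
          intro hqe
          exact hp1 (hqe ▸ List.mem_map_of_mem hq)
        simp [h1, h2]
    · simp only [hs, if_false]
      exact ihskip

theorem pvMap_fst_insertBy (kA : String → Int) (p : String × Int) (acc : List (String × Int))
    (hp : kA p.1 = p.2) (hacc : ∀ q ∈ acc, kA q.1 = q.2) :
    (PySem.List.insertBy (fun a b => decide ((b.2 : Int) < a.2)) p acc).map Prod.fst
      = PySem.List.insertBy (fun a b => decide (kA b < kA a)) p.1 (acc.map Prod.fst) := by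
  induction acc with
  | nil => simp [PySem.List.insertBy]
  | cons q acc ih =>
    have hq := hacc q List.mem_cons_self
    simp only [PySem.List.insertBy, List.map_cons]
    rw [hq, hp]
    split
    · simp
    · simp only [List.map_cons]
      rw [ih (fun q' h' => hacc q' (List.mem_cons_of_mem _ h'))]

theorem pvSorted_map_fst (kA : String → Int) (l : List (String × Int))
    (h : ∀ p ∈ l, kA p.1 = p.2) :
    PySem.List.sorted (l.map Prod.fst) kA true
      = (PySem.List.sorted l (fun p => p.2) true).map Prod.fst := by
  rw [PySem.List.sorted_rev_eq_foldl_insertBy, PySem.List.sorted_rev_eq_foldl_insertBy]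
  have main : ∀ (l' : List (String × Int)) (acc : List (String × Int)),
      (∀ p ∈ l', kA p.1 = p.2) → (∀ q ∈ acc, kA q.1 = q.2) →
      (l'.map Prod.fst).foldl
          (fun a x => PySem.List.insertBy (fun a b => decide (kA b < kA a)) x a) (acc.map Prod.fst)
        = (l'.foldl
            (fun a x => PySem.List.insertBy (fun a b => decide ((b.2 : Int) < a.2)) x a) acc).map Prod.fst := by
    intro l'
    induction l' with
    | nil => intro acc _ _; rfl
    | cons p l' ih =>
      intro acc hl hacc
      simp only [List.map_cons, List.foldl_cons]
      rw [← pvMap_fst_insertBy kA p acc (hl p List.mem_cons_self) hacc]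
      refine ih _ (fun q hq => hl q (List.mem_cons_of_mem _ hq)) ?_
      intro q hq
      rcases (PySem.List.mem_insertBy _ _ _ _).1 hq with rfl | hm
      · exact hl q List.mem_cons_self
      · exact hacc q hm
  simpa using main l [] h (by intro q hq; cases hq)

-- ===== VERDICT (by name: the statement is the Claim_ definition above) =====
theorem find_multiple_tags_spec : Claim_equal_find_multiple_tags := by
  intro text keyword_map valid_tags exclude limit _
  simp only [Spec_find_multiple_tags, find_multiple_tags, find_multiple_tags_alt, normalize_text]
  set excl : List String := exclude.getD [] with hexcl
  set tl : String := PySem.Str.strip (PySem.Str.lower text) with htl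
  set d : PySem.Dict String (List String) := PySem.Dict.ofList keyword_map with hd
  set w : PySem.Dict String Int := pvWeightLoop valid_tags excl tl d.items with hw
  have hnd : (d.items.map Prod.fst).Nodup := PySem.Dict.nodup_keys_ofList keyword_map
  have hscoreeq : ∀ p ∈ d.items, valid_tags.contains p.1 = true →
      excl.contains p.1 = false → pvSumWeight w p.2 = pvTagScore tl p.2 := by
    intro p hp hv he
    refine pvSumWeight_eq tl w p.2 ?_
    intro kw hkw
    exact pvWeightLoop_getD valid_tags excl tl d.items p hp hv he kw hkw
  have hitems : (pvScoresLoop valid_tags excl tl d.items PySem.Dict.empty).items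
      = pvRankedLoop valid_tags excl w d.items [] := by
    refine pvLoop_items valid_tags excl tl w d.items PySem.Dict.empty [] rfl hnd ?_ hscoreeq
    intro p _
    exact PySem.Dict.contains_empty p.1
  set scores := pvScoresLoop valid_tags excl tl d.items PySem.Dict.empty with hscores
  set ranked := pvRankedLoop valid_tags excl w d.items [] with hranked
  have hkeys : scores.keys = ranked.map Prod.fst := by
    show scores.items.map (fun x => x.1) = ranked.map Prod.fst
    rw [hitems]
  have hranknd : (ranked.map Prod.fst).Nodup := by
    have hsub := pvRankedLoop_sublist valid_tags excl w d.items []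
    simp only [List.map_nil, List.nil_append] at hsub
    exact hsub.nodup hnd
  have hkA : ∀ p ∈ ranked, scores.getD p.1 0 = p.2 := by
    intro p hp
    have hmem : (p.1, p.2) ∈ scores.items := by rw [hitems]; simpa using hp
    exact PySem.Dict.getD_of_mem_items scores hmem (by rw [hkeys]; exact hranknd) 0
  rw [hkeys, pvSorted_map_fst (fun t => scores.getD t 0) ranked hkA]
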